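-- pv_equiv track=rewrite | github.com/henriquefariapd/rocksymphony | BackEnd/shipping_calculator.py | get_estimated_delivery_days
-- ===== SOURCE A (Python) =====
-- def get_estimated_delivery_days(destination_cep: str) -> int:
--     """
--     Retorna estimativa de dias úteis para entrega
--     """
--     try:
--         destination_clean = ''.join(filter(str.isdigit, destination_cep))
--         region_code = int(destination_clean[:2])
--
--         # Estimativa de dias por região
--         delivery_days = {
--             # Sudeste - mais próximo
--             **{i: 3 for i in range(1, 40)},
--
--             # Sul
--             **{i: 5 for i in range(80, 100)},
--
--             # Nordeste
--             **{i: 7 for i in range(40, 66)},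
--
--             # Norte
--             **{i: 10 for i in range(66, 70)},
--             **{i: 12 for i in range(78, 80)},
--
--             # Centro-Oeste
--             **{i: 6 for i in range(70, 78)},
--         }
--
--         return delivery_days.get(region_code, 7)  # Padrão: 7 dias
--
--     except Exception:
--         return 7  # Valor padrão
-- ===== SOURCE B (Python) =====
-- def get_estimated_delivery_days(destination_cep: str) -> int:
--     # Lazy single pass: pick only the first two digit characters and dispatch
--     # on them directly (no int() conversion, no lookup table).
--     it = (c for c in destination_cep if c.isdigit())
--     d1 = next(it, None)
--     if d1 is None:
--         return 7
--     d2 = next(it, None)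
--     if d2 is None:
--         return 3 if d1 != '0' else 7
--     if d1 in '123':
--         return 3
--     if d1 == '0':
--         return 7 if d2 == '0' else 3
--     if d1 in '45':
--         return 7
--     if d1 == '6':
--         return 10 if d2 >= '6' else 7
--     if d1 == '7':
--         return 12 if d2 >= '8' else 6
--     return 5
-- ===== Notes on version B (the rewrite author's own statement) =====
-- stated objective: alternative
-- what changed: B never builds or indexes the 100-entry dict and never converts the CEP prefix to an integer: it lazily scans the string for just the first two digit characters (stopping early) and decides the days by dispatching on those characters themselves, with the two-char cases resolved per leading digit.
import Mathlib
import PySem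

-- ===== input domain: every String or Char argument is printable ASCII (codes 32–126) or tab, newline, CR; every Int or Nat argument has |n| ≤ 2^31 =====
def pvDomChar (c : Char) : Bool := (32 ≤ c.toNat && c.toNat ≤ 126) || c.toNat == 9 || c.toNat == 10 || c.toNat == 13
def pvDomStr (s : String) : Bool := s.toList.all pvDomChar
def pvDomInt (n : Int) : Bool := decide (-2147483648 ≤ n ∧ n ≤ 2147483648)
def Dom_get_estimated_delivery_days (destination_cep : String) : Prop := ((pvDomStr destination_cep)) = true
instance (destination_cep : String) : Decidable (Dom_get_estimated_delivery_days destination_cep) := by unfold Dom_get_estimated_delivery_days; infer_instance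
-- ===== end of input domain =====

-- B replaces A's filter-whole-string + int() + rebuilt 100-entry dict lookup by a lazy
-- scan for the first two digit characters and a per-character dispatch (alternative).

-- ===== PORT A =====
-- the dict literal with the six unpacked range-comprehensions, built by inserting in order
def pvDeliveryDict : PySem.Dict Int Int :=
  let d := (PySem.List.pyRange 1 40 1).foldl (fun d i => d.insert i 3) PySem.Dict.empty
  let d := (PySem.List.pyRange 80 100 1).foldl (fun d i => d.insert i 5) d
  let d := (PySem.List.pyRange 40 66 1).foldl (fun d i => d.insert i 7) d
  let d := (PySem.List.pyRange 66 70 1).foldl (fun d i => d.insert i 10) d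
  let d := (PySem.List.pyRange 78 80 1).foldl (fun d i => d.insert i 12) d
  (PySem.List.pyRange 70 78 1).foldl (fun d i => d.insert i 6) d

def get_estimated_delivery_days (destination_cep : String) : Int :=
  let destination_clean := destination_cep.toList.filter PySem.Chars.isdigit
  match PySem.Int.ofChars? (PySem.List.slice destination_clean none (some 2)) with
  | none => 7          -- int('') raises ValueError → except returns 7
  | some region_code => pvDeliveryDict.getD region_code 7

-- ===== PORT B =====
-- next(it, None) on the digit generator: first digit character of the remaining input
def pvNextDigit : List Char → Option Char
  | [] => none
  | c :: cs => if PySem.Chars.isdigit c then some c else pvNextDigit cs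

-- the two next(...) calls: first digit, and first digit of what follows it
def pvFirstTwoDigits : List Char → Option (Char × Option Char)
  | [] => none
  | c :: cs => if PySem.Chars.isdigit c then some (c, pvNextDigit cs) else pvFirstTwoDigits cs

def get_estimated_delivery_days_alt (destination_cep : String) : Int :=
  match pvFirstTwoDigits destination_cep.toList with
  | none => 7
  | some (d1, none) => if d1 ≠ '0' then 3 else 7
  | some (d1, some d2) =>
      if d1 = '1' ∨ d1 = '2' ∨ d1 = '3' then 3
      else if d1 = '0' then (if d2 = '0' then 7 else 3)
      else if d1 = '4' ∨ d1 = '5' then 7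
      else if d1 = '6' then (if '6' ≤ d2 then 10 else 7)
      else if d1 = '7' then (if '8' ≤ d2 then 12 else 6)
      else 5

-- ===== PRECONDITION & SPEC =====
def Spec_get_estimated_delivery_days (destination_cep : String) (out : Int) : Prop := out = get_estimated_delivery_days_alt destination_cep
instance (destination_cep : String) (out : Int) : Decidable (Spec_get_estimated_delivery_days destination_cep out) := by unfold Spec_get_estimated_delivery_days; infer_instance

-- ===== CLAIM (what is proved, stated in full; the proofs are below) =====
def Claim_equal_get_estimated_delivery_days : Prop := ∀ (destination_cep : String), Dom_get_estimated_delivery_days destination_cep → Spec_get_estimated_delivery_days destination_cep (get_estimated_delivery_days destination_cep)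

-- ===== LEMMAS AND PROOFS =====

-- proof-side arithmetic characterisation of A's dict
def pvDays (rc : Int) : Int :=
  if 1 ≤ rc ∧ rc < 40 then 3
  else if 40 ≤ rc ∧ rc < 66 then 7
  else if 66 ≤ rc ∧ rc < 70 then 10
  else if 70 ≤ rc ∧ rc < 78 then 6
  else if 78 ≤ rc ∧ rc < 80 then 12
  else if 80 ≤ rc ∧ rc < 100 then 5
  else 7

-- lookup after a loop of constant-value inserts (the loop shape of pvDeliveryDict's folds)
lemma pvGetD_foldl_insert_const {K V : Type} [BEq K] [LawfulBEq K] [DecidableEq K]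
    (l : List K) (v : V) (d : PySem.Dict K V) (k : K) (dflt : V) :
    (l.foldl (fun d i => d.insert i v) d).getD k dflt =
      if k ∈ l then v else d.getD k dflt := by
  induction l generalizing d with
  | nil => simp
  | cons a t ih =>
    simp only [List.foldl_cons, ih, List.mem_cons]
    by_cases hk : k = a
    · subst hk
      by_cases ht : k ∈ t <;> simp [ht, PySem.Dict.getD_insert_self]
    · by_cases ht : k ∈ t <;> simp [ht, hk, PySem.Dict.getD_insert_of_ne d v dflt hk]

lemma pvDict_eq_days (rc : Int) : pvDeliveryDict.getD rc 7 = pvDays rc := by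
  unfold pvDeliveryDict pvDays
  simp only [pvGetD_foldl_insert_const, PySem.List.mem_pyRange_one]
  have hempty : (PySem.Dict.empty : PySem.Dict Int Int).getD rc 7 = 7 := rfl
  rw [hempty]
  split_ifs <;> omega

lemma pvNextDigit_eq_head_filter (l : List Char) :
    pvNextDigit l = (l.filter PySem.Chars.isdigit).head? := by
  induction l with
  | nil => rfl
  | cons c cs ih =>
    by_cases h : PySem.Chars.isdigit c <;> simp [pvNextDigit, h, ih]

lemma pvFirstTwoDigits_eq (l : List Char) :
    pvFirstTwoDigits l =
      match l.filter PySem.Chars.isdigit with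
      | [] => none
      | a :: r => some (a, r.head?) := by
  induction l with
  | nil => rfl
  | cons c cs ih =>
    by_cases h : PySem.Chars.isdigit c <;>
      simp [pvFirstTwoDigits, h, ih, pvNextDigit_eq_head_filter]

lemma pvDigit_mem (c : Char) (h : PySem.Chars.isdigit c = true) :
    c ∈ ['0','1','2','3','4','5','6','7','8','9'] := by
  simp only [PySem.Chars.isdigit, Bool.and_eq_true, decide_eq_true_eq, Char.le_def,
    UInt32.le_iff_toNat_le] at h
  have h1 : 48 ≤ c.toNat := h.1
  have h2 : c.toNat ≤ 57 := h.2
  have hc : c = Char.ofNat c.toNat := (Char.ofNat_toNat c).symm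
  interval_cases hv : c.toNat <;> rw [hc] <;> decide

-- ===== VERDICT (by name: the statement is the Claim_ definition above) =====
theorem get_estimated_delivery_days_spec : Claim_equal_get_estimated_delivery_days := by
  intro s _
  unfold Spec_get_estimated_delivery_days get_estimated_delivery_days get_estimated_delivery_days_alt
  have h2 : ∀ xs : List Char, PySem.List.slice xs none (some 2) = xs.take 2 :=
    fun xs => PySem.List.slice_to xs (by omega)
  simp only [h2, pvFirstTwoDigits_eq]
  have hbridge : ∀ cs : List Char,
      (match PySem.Int.ofChars? cs with
       | none => (7 : Int)
       | some rc => pvDeliveryDict.getD rc 7) =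
      (match PySem.Int.ofChars? cs with
       | none => (7 : Int)
       | some rc => pvDays rc) := by
    intro cs; cases PySem.Int.ofChars? cs with
    | none => rfl
    | some rc => exact pvDict_eq_days rc
  rcases hf : s.toList.filter PySem.Chars.isdigit with _ | ⟨a, _ | ⟨b, r⟩⟩
  · rfl
  · have ha : PySem.Chars.isdigit a = true :=
      (List.mem_filter.mp (hf ▸ List.mem_singleton_self a)).2
    rw [hbridge]
    have hma := pvDigit_mem a ha
    fin_cases hma <;> decide
  · have hma := pvDigit_mem a
      ((List.mem_filter.mp (hf ▸ (List.mem_cons_self : a ∈ a :: b :: r))).2)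
    have hmb := pvDigit_mem b
      ((List.mem_filter.mp (hf ▸ (by simp : b ∈ a :: b :: r))).2)
    rw [hbridge]
    simp only [List.take_succ_cons, List.take_zero, List.head?_cons]
    fin_cases hma <;> fin_cases hmb <;> decide
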